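-- pv_equiv track=rewrite | github.com/kokonz/PTS_Mini-AES_Kel6 | nyoba/1.py | inverse_mix_columns
-- ===== SOURCE A (Python) =====
-- mult2 = [0,2,4,6,8,0xA,0xC,0xE,3,1,7,5,0xB,9,0xF,0xD]
--
-- mult9 = [
--     0x0, 0x9, 0x1, 0x8,
--     0x2, 0xB, 0x3, 0xA,
--     0x4, 0xD, 0x5, 0xC,
--     0x6, 0xF, 0x7, 0xE
-- ]
--
-- def inverse_mix_columns(state):
--     new_state = [[0]*2 for _ in range(2)]
--     a, c = state[0][0], state[1][0]
--     new_state[0][0] = mult9[a] ^ mult2[c]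
--     new_state[1][0] = mult2[a] ^ mult9[c]
--     b, d = state[0][1], state[1][1]
--     new_state[0][1] = mult9[b] ^ mult2[d]
--     new_state[1][1] = mult2[b] ^ mult9[d]
--     return new_state
-- ===== SOURCE B (Python) =====
-- def gmul(a, b):
--     # GF(2^4) multiply, modulus x^4 + x + 1 (0x13); a is masked to 4 bits first
--     a &= 0xF
--     p = 0
--     for _ in range(4):
--         if b & 1:
--             p ^= a
--         carry = a & 0x8
--         a = (a << 1) & 0xF
--         if carry:
--             a ^= 0x3
--         b >>= 1
--     return p
--
-- def inverse_mix_columns(state):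
--     row0, row1 = [], []
--     for j in range(2):
--         x, y = state[0][j], state[1][j]
--         row0.append(gmul(x, 9) ^ gmul(y, 2))
--         row1.append(gmul(x, 2) ^ gmul(y, 9))
--     return [row0, row1]
-- ===== Notes on version B (the rewrite author's own statement) =====
-- stated objective: alternative
-- what changed: Replaces the two 16-entry lookup tables with an on-the-fly GF(2^4) shift-and-reduce multiplier gmul(a,b) (modulus 0x13) and a single loop over the two columns.
import Mathlib
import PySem

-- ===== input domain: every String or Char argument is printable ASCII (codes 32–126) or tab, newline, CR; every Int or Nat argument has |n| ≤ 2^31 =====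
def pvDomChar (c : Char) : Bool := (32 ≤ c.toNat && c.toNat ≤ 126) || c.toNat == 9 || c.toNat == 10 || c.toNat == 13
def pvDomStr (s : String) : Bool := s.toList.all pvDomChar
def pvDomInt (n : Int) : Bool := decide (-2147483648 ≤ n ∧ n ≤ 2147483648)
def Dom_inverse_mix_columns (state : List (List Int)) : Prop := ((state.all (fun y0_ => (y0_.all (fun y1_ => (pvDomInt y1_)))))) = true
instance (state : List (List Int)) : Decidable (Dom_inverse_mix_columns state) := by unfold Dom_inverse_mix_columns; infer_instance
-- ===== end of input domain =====

-- B replaces A's two 16-entry lookup tables with an on-the-fly GF(2^4) shift-and-reduce multiplier; no speed claim.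

-- ===== PORT A =====
-- mult2 / mult9 tables, verbatim
def mult2 : List Int := [0,2,4,6,8,0xA,0xC,0xE,3,1,7,5,0xB,9,0xF,0xD]
def mult9 : List Int := [0x0,0x9,0x1,0x8,0x2,0xB,0x3,0xA,0x4,0xD,0x5,0xC,0x6,0xF,0x7,0xE]

-- Python list indexing l[i] (negative wraps, out of range raises); the getD 0 default is
-- never reached inside Pre_inverse_mix_columns, which excludes exactly the raising inputs.
def pyAtI (l : List Int) (i : Int) : Int := (PySem.List.pyGet? l i).getD 0
def pyAtL (l : List (List Int)) (i : Int) : List Int := (PySem.List.pyGet? l i).getD []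
-- new_state[i][j] = v, the element assignment on the 2x2 zero matrix
def setAt (ns : List (List Int)) (i j : Nat) (v : Int) : List (List Int) :=
  ns.set i ((ns.getD i []).set j v)

def inverse_mix_columns (state : List (List Int)) : List (List Int) :=
  let new_state : List (List Int) := [List.replicate 2 0, List.replicate 2 0]
  let a := pyAtI (pyAtL state 0) 0
  let c := pyAtI (pyAtL state 1) 0
  let new_state := setAt new_state 0 0 (PySem.Int.bxor (pyAtI mult9 a) (pyAtI mult2 c))
  let new_state := setAt new_state 1 0 (PySem.Int.bxor (pyAtI mult2 a) (pyAtI mult9 c))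
  let b := pyAtI (pyAtL state 0) 1
  let d := pyAtI (pyAtL state 1) 1
  let new_state := setAt new_state 0 1 (PySem.Int.bxor (pyAtI mult9 b) (pyAtI mult2 d))
  let new_state := setAt new_state 1 1 (PySem.Int.bxor (pyAtI mult2 b) (pyAtI mult9 d))
  new_state

-- ===== PORT B =====
-- GF(2^4) multiply, modulus x^4+x+1 (0x13); a is masked to 4 bits first; 4 fixed rounds
def gmul (a b : Int) : Int :=
  let st := (List.range 4).foldl
    (fun (st : Int × Int × Int) _ =>
      let (a, b, p) := st
      let p := if PySem.Int.band b 1 ≠ 0 then PySem.Int.bxor p a else p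
      let carry := PySem.Int.band a 0x8
      let a := PySem.Int.band (a <<< 1) 0xF
      let a := if carry ≠ 0 then PySem.Int.bxor a 0x3 else a
      (a, b >>> 1, p))
    (PySem.Int.band a 0xF, b, 0)
  st.2.2

def inverse_mix_columns_alt (state : List (List Int)) : List (List Int) :=
  let rows := (List.range 2).foldl
    (fun (rs : List Int × List Int) j =>
      let x := pyAtI (pyAtL state 0) (j : Int)
      let y := pyAtI (pyAtL state 1) (j : Int)
      (rs.1 ++ [PySem.Int.bxor (gmul x 9) (gmul y 2)], rs.2 ++ [PySem.Int.bxor (gmul x 2) (gmul y 9)]))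
    ([], [])
  [rows.1, rows.2]

-- ===== PRECONDITION & SPEC =====
-- Pre_ excludes exactly the inputs on which A raises IndexError: fewer than 2 rows, a read row
-- shorter than 2, or a nibble outside [-16,16) (out of range for the 16-entry tables).
def Pre_inverse_mix_columns (state : List (List Int)) : Prop :=
  2 ≤ state.length ∧
  ∀ r ∈ state.take 2, 2 ≤ r.length ∧ ∀ x ∈ r.take 2, -16 ≤ x ∧ x < 16

instance (state : List (List Int)) : Decidable (Pre_inverse_mix_columns state) := by
  unfold Pre_inverse_mix_columns; infer_instance

def pvWitness_inverse_mix_columns : List (List Int) := [[1, 14], [-3, 0]]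

def Spec_inverse_mix_columns (state : List (List Int)) (out : List (List Int)) : Prop := out = inverse_mix_columns_alt state
instance (state : List (List Int)) (out : List (List Int)) : Decidable (Spec_inverse_mix_columns state out) := by unfold Spec_inverse_mix_columns; infer_instance

-- ===== CLAIM (what is proved, stated in full; the proofs are below) =====
def Claim_equal_inverse_mix_columns : Prop := ∀ (state : List (List Int)), Dom_inverse_mix_columns state → Pre_inverse_mix_columns state → Spec_inverse_mix_columns state (inverse_mix_columns state)

-- ===== LEMMAS AND PROOFS =====

lemma gmul9_eq (a : Int) (h1 : -16 ≤ a) (h2 : a < 16) : gmul a 9 = pyAtI mult9 a := by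
  interval_cases a <;> decide

lemma gmul2_eq (a : Int) (h1 : -16 ≤ a) (h2 : a < 16) : gmul a 2 = pyAtI mult2 a := by
  interval_cases a <;> decide

lemma pyAtL_zero (x : List Int) (r : List (List Int)) : pyAtL (x :: r) 0 = x := by
  simp [pyAtL, PySem.List.pyGet?, PySem.List.pyIdx?]

lemma pyAtL_one (x y : List Int) (r : List (List Int)) : pyAtL (x :: y :: r) 1 = y := by
  simp [pyAtL, PySem.List.pyGet?, PySem.List.pyIdx?]

lemma pyAtI_zero (x : Int) (r : List Int) : pyAtI (x :: r) 0 = x := by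
  simp [pyAtI, PySem.List.pyGet?, PySem.List.pyIdx?]

lemma pyAtI_one (x y : Int) (r : List Int) : pyAtI (x :: y :: r) 1 = y := by
  simp [pyAtI, PySem.List.pyGet?, PySem.List.pyIdx?]

lemma two_le_shape {α : Type} (l : List α) (h : 2 ≤ l.length) :
    ∃ x y t, l = x :: y :: t := by
  match l with
  | x :: y :: t => exact ⟨x, y, t, rfl⟩

-- ===== VERDICT (by name: the statement is the Claim_ definition above) =====
theorem inverse_mix_columns_spec : Claim_equal_inverse_mix_columns := by
  intro state _ hpre
  obtain ⟨hlen, hrows⟩ := hpre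
  obtain ⟨r0, r1, t, rfl⟩ := two_le_shape state hlen
  obtain ⟨h0len, h0⟩ := hrows r0 (by simp)
  obtain ⟨h1len, h1⟩ := hrows r1 (by simp)
  obtain ⟨a, b, t0, rfl⟩ := two_le_shape r0 h0len
  obtain ⟨c, d, t1, rfl⟩ := two_le_shape r1 h1len
  obtain ⟨ha1, ha2⟩ := h0 a (by simp)
  obtain ⟨hb1, hb2⟩ := h0 b (by simp)
  obtain ⟨hc1, hc2⟩ := h1 c (by simp)
  obtain ⟨hd1, hd2⟩ := h1 d (by simp)
  show inverse_mix_columns _ = inverse_mix_columns_alt _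
  simp only [inverse_mix_columns, inverse_mix_columns_alt, List.range,
    List.range.loop, setAt, pyAtL_zero, pyAtL_one]
  simp [List.replicate, pyAtI_zero, pyAtI_one,
    gmul9_eq a ha1 ha2, gmul2_eq a ha1 ha2, gmul9_eq b hb1 hb2, gmul2_eq b hb1 hb2,
    gmul9_eq c hc1 hc2, gmul2_eq c hc1 hc2, gmul9_eq d hd1 hd2, gmul2_eq d hd1 hd2]
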